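-- pv_equiv track=rewrite | github.com/callmePjotr/GoatActivity_LK | M2/export_tracklets.py | group_into_tracklets
-- ===== SOURCE A (Python) =====
-- def group_into_tracklets(track_data, gap_threshold=10):
--     """Group track data into continuous tracklets"""
--     if not track_data:
--         return []
--
--     track_data = sorted(track_data, key=lambda x: x[0])
--     tracklets = []
--     current = [track_data[0]]
--
--     for i in range(1, len(track_data)):
--         if track_data[i][0] - track_data[i - 1][0] <= gap_threshold:
--             current.append(track_data[i])
--         else:
--             tracklets.append(current)
--             current = [track_data[i]]
--     tracklets.append(current)
--     return tracklets
-- ===== SOURCE B (Python) =====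
-- def group_into_tracklets(track_data, gap_threshold=10):
--     """Group track data into continuous tracklets (breakpoints + slicing)."""
--     if not track_data:
--         return []
--     s = sorted(track_data, key=lambda x: x[0])
--     n = len(s)
--     breaks = [i for i in range(1, n) if s[i][0] - s[i - 1][0] > gap_threshold]
--     bounds = [0] + breaks + [n]
--     return [s[a:b] for a, b in zip(bounds, bounds[1:])]
-- ===== Notes on version B (the rewrite author's own statement) =====
-- stated objective: alternative
-- what changed: Instead of growing the current tracklet element-by-element in one stateful loop, B first computes the list of break indices in one pass and then slices the sorted list between consecutive bounds.
import Mathlib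
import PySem

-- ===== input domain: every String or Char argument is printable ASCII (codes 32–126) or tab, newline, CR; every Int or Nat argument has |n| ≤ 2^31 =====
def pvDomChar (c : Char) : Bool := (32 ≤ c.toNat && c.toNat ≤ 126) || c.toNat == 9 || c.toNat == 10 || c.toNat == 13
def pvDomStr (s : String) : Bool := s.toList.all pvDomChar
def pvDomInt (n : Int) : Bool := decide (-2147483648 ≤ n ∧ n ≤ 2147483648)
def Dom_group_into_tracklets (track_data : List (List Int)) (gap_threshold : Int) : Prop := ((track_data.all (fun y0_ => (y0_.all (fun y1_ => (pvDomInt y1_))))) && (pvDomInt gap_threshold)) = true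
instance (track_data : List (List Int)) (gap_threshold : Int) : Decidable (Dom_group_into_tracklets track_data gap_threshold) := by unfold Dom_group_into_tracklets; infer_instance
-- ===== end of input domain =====

-- B replaces A's stateful element-by-element accumulation by a breakpoint pass followed by slicing; alternative decomposition, same cost.

-- ===== PORT A =====
-- literal port of A: sort by x[0], then one stateful loop over indices 1..n-1 appending to the
-- current tracklet or flushing it (the pyGetD defaults stand for x[0], never hit under Pre_)
def group_into_tracklets (track_data : List (List Int)) (gap_threshold : Int) : List (List (List Int)) :=
  if track_data = [] then []
  else
    let s := PySem.List.sorted track_data (fun x => PySem.List.pyGetD x 0 0) false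
    let st := (PySem.List.pyRange 1 (s.length : Int) 1).foldl
      (fun (st : List (List (List Int)) × List (List Int)) i =>
        if PySem.List.pyGetD (PySem.List.pyGetD s i []) 0 0
             - PySem.List.pyGetD (PySem.List.pyGetD s (i - 1) []) 0 0 ≤ gap_threshold then
          (st.1, st.2 ++ [PySem.List.pyGetD s i []])
        else
          (st.1 ++ [st.2], [PySem.List.pyGetD s i []]))
      ([], [PySem.List.pyGetD s 0 []])
    st.1 ++ [st.2]

-- ===== PORT B =====
-- literal port of Source B: break indices by filter, bounds = 0 :: breaks ++ [n], slice between bounds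
def group_into_tracklets_alt (track_data : List (List Int)) (gap_threshold : Int) : List (List (List Int)) :=
  if track_data = [] then []
  else
    let s := PySem.List.sorted track_data (fun x => PySem.List.pyGetD x 0 0) false
    let n : Int := (s.length : Int)
    let breaks := (PySem.List.pyRange 1 n 1).filter
      (fun i => PySem.List.pyGetD (PySem.List.pyGetD s i []) 0 0
                  - PySem.List.pyGetD (PySem.List.pyGetD s (i - 1) []) 0 0 > gap_threshold)
    let bounds := (0 : Int) :: breaks ++ [n]
    (bounds.zip bounds.tail).map (fun p => PySem.List.slice s (some p.1) (some p.2))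

-- ===== PRECONDITION & SPEC =====
-- Pre_ excludes exactly the inputs on which Python A raises IndexError: a row with no x[0]
-- (the sort key indexes an empty inner list); Python B raises there too.
def Pre_group_into_tracklets (track_data : List (List Int)) (gap_threshold : Int) : Prop :=
  ∀ r ∈ track_data, r ≠ []
instance (track_data : List (List Int)) (gap_threshold : Int) : Decidable (Pre_group_into_tracklets track_data gap_threshold) := by unfold Pre_group_into_tracklets; infer_instance
def pvWitness_group_into_tracklets : List (List Int) × Int := ([[1, 5], [30, 6], [3, 7]], 10)

def Spec_group_into_tracklets (track_data : List (List Int)) (gap_threshold : Int) (out : List (List (List Int))) : Prop := out = group_into_tracklets_alt track_data gap_threshold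
instance (track_data : List (List Int)) (gap_threshold : Int) (out : List (List (List Int))) : Decidable (Spec_group_into_tracklets track_data gap_threshold out) := by unfold Spec_group_into_tracklets; infer_instance

-- ===== CLAIM (what is proved, stated in full; the proofs are below) =====
def Claim_equal_group_into_tracklets : Prop := ∀ (track_data : List (List Int)) (gap_threshold : Int), Dom_group_into_tracklets track_data gap_threshold → Pre_group_into_tracklets track_data gap_threshold → Spec_group_into_tracklets track_data gap_threshold (group_into_tracklets track_data gap_threshold)

-- ===== LEMMAS AND PROOFS =====

-- d(i) of A's loop / B's filter, and B's list of break indices up to m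
def trkItem (s : List (List Int)) (i : Int) : Int :=
  PySem.List.pyGetD (PySem.List.pyGetD s i []) 0 0

def trkBks (s : List (List Int)) (gap : Int) (m : Nat) : List Int :=
  (PySem.List.pyRange 1 (m : Int) 1).filter
    (fun i => trkItem s i - trkItem s (i - 1) > gap)

theorem zip_tail_snoc {α : Type} (l : List α) (h : l ≠ []) (x : α) :
    ((l ++ [x]).zip (l ++ [x]).tail) = l.zip l.tail ++ [(l.getLast h, x)] := by
  induction l with
  | nil => simp at h
  | cons a t ih =>
    cases t with
    | nil => simp
    | cons b u =>
      have ih' := ih (List.cons_ne_nil b u)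
      simp only [List.cons_append, List.tail_cons, List.zip_cons_cons] at ih' ⊢
      rw [ih']
      simp [List.getLast_cons]

theorem take_drop_snoc {α : Type} (s : List α) (d : α) (a m : Nat) (ha : a ≤ m) (hm : m < s.length) :
    (s.drop a).take (m + 1 - a) = (s.drop a).take (m - a) ++ [s.getD m d] := by
  rw [show m + 1 - a = (m - a) + 1 by omega, List.take_add_one]
  congr 1
  rw [List.getElem?_drop, show a + (m - a) = m by omega, List.getElem?_eq_getElem hm]
  simp [List.getD, List.getElem?_eq_getElem hm]

theorem trkBks_mem (s : List (List Int)) (gap : Int) (m : Nat) :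
    ∀ x ∈ trkBks s gap m, 1 ≤ x ∧ x < (m : Int) := by
  intro x hx
  have := List.mem_filter.mp hx
  exact (PySem.List.mem_pyRange_one).mp this.1

theorem getLastD_zero_cons_bounds (l : List Int) (m : Nat) (hm : 1 ≤ m)
    (h : ∀ x ∈ l, 1 ≤ x ∧ x < (m : Int)) :
    0 ≤ ((0 : Int) :: l).getLastD 0 ∧ ((0 : Int) :: l).getLastD 0 < (m : Int) := by
  cases l with
  | nil => constructor <;> simp <;> omega
  | cons a t =>
    have h1 : ((0 : Int) :: a :: t).getLastD 0 = (a :: t).getLast (List.cons_ne_nil a t) := by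
      rw [show ((0 : Int) :: a :: t).getLastD 0
            = ((0 : Int) :: a :: t).getLast (List.cons_ne_nil 0 (a :: t)) from rfl]
      rw [List.getLast_cons (List.cons_ne_nil a t)]
    rw [h1]
    have := h _ (List.getLast_mem (List.cons_ne_nil a t))
    exact ⟨by omega, this.2⟩

theorem getLastD_concat_int (l : List Int) (x d : Int) : (l ++ [x]).getLastD d = x := by
  rw [List.getLastD_eq_getLast?, List.getLast?_concat]
  rfl

theorem slice_snoc (s : List (List Int)) (a : Int) (m : Nat) (ha0 : 0 ≤ a)
    (ham : a ≤ (m : Int)) (hm : m < s.length) :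
    PySem.List.slice s (some a) (some ((m : Int) + 1)) =
      PySem.List.slice s (some a) (some (m : Int)) ++ [PySem.List.pyGetD s (m : Int) []] := by
  rw [PySem.List.slice_toNat s ha0 (by omega), PySem.List.slice_toNat s ha0 (by positivity)]
  rw [show ((m : Int) + 1).toNat = m + 1 by omega, Int.toNat_natCast]
  rw [take_drop_snoc s [] a.toNat m (by omega) hm]
  simp

-- loop invariant: A's fold over 1..m equals (slices between bounds so far, slice from the last break to m)
theorem trkInv (s : List (List Int)) (gap : Int) (m : Nat) (h1 : 1 ≤ m) (h2 : m ≤ s.length) :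
    (PySem.List.pyRange 1 (m : Int) 1).foldl
      (fun (st : List (List (List Int)) × List (List Int)) i =>
        if PySem.List.pyGetD (PySem.List.pyGetD s i []) 0 0
             - PySem.List.pyGetD (PySem.List.pyGetD s (i - 1) []) 0 0 ≤ gap then
          (st.1, st.2 ++ [PySem.List.pyGetD s i []])
        else (st.1 ++ [st.2], [PySem.List.pyGetD s i []]))
      ([], [PySem.List.pyGetD s 0 []])
    = ((((0 : Int) :: trkBks s gap m).zip ((0 : Int) :: trkBks s gap m).tail).map
         (fun p => PySem.List.slice s (some p.1) (some p.2)),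
       PySem.List.slice s (some (((0 : Int) :: trkBks s gap m).getLastD 0))
         (some (m : Int))) := by
  induction m, h1 using Nat.le_induction with
  | base =>
    have hs : s ≠ [] := by intro h; simp [h] at h2
    have e1 : ((1 : Nat) : Int) = 1 := by norm_num
    simp only [trkBks, e1, PySem.List.pyRange_one_eq_nil (le_refl (1 : Int)),
      List.filter_nil, List.foldl_nil, List.tail_cons, List.zip_nil_right,
      List.map_nil, List.getLastD]
    rw [List.getLast_singleton]
    rw [PySem.List.slice_toNat s (le_refl 0) (by norm_num)]
    cases s with
    | nil => simp at hs
    | cons x xs => simp [PySem.List.pyGetD_zero_cons]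
  | succ m hm ih =>
    have ih' := ih (by omega)
    have hmlt : m < s.length := by omega
    push_cast
    rw [PySem.List.pyRange_one_succ_right (by exact_mod_cast hm), List.foldl_append, ih']
    simp only [List.foldl_cons, List.foldl_nil]
    have hbks : trkBks s gap (m + 1)
        = trkBks s gap m ++ (PySem.List.pyRange (m : Int) ((m : Int) + 1) 1).filter
            (fun i => trkItem s i - trkItem s (i - 1) > gap) := by
      unfold trkBks
      push_cast
      rw [PySem.List.pyRange_one_append 1 (m : Int) ((m : Int) + 1) (by exact_mod_cast hm) (by omega),
        List.filter_append]
    have hlast := getLastD_zero_cons_bounds (trkBks s gap m) m hm (trkBks_mem s gap m)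
    by_cases hc : PySem.List.pyGetD (PySem.List.pyGetD s (m : Int) []) 0 0
        - PySem.List.pyGetD (PySem.List.pyGetD s ((m : Int) - 1) []) 0 0 ≤ gap
    · have hpred : (decide (trkItem s (m : Int) - trkItem s ((m : Int) - 1) > gap)) = false := by
        simp only [trkItem]
        exact decide_eq_false (not_lt.mpr hc)
      have hb : trkBks s gap (m + 1) = trkBks s gap m := by
        rw [hbks, PySem.List.pyRange_one_singleton, List.filter_singleton, hpred]
        simp
      rw [if_pos hc, hb]
      rw [slice_snoc s _ m hlast.1 (le_of_lt hlast.2) hmlt]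
    · have hpred : (decide (trkItem s (m : Int) - trkItem s ((m : Int) - 1) > gap)) = true := by
        simp only [trkItem]
        exact decide_eq_true (lt_of_not_ge hc)
      have hb : trkBks s gap (m + 1) = trkBks s gap m ++ [(m : Int)] := by
        rw [hbks, PySem.List.pyRange_one_singleton, List.filter_singleton, hpred]
        simp
      rw [if_neg hc, hb]
      have hz : ((0 : Int) :: (trkBks s gap m ++ [(m : Int)]))
          = ((0 : Int) :: trkBks s gap m) ++ [(m : Int)] := by simp
      rw [hz, zip_tail_snoc ((0 : Int) :: trkBks s gap m) (List.cons_ne_nil 0 _) (m : Int),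
        List.map_append]
      rw [show (((0 : Int) :: trkBks s gap m) ++ [(m : Int)]).getLastD 0 = (m : Int) from
        getLastD_concat_int _ _ _]
      rw [show ((0 : Int) :: trkBks s gap m).getLast (List.cons_ne_nil 0 (trkBks s gap m))
            = ((0 : Int) :: trkBks s gap m).getLastD 0 from rfl]
      have hsing : PySem.List.slice s (some (m : Int)) (some ((m : Int) + 1))
          = [PySem.List.pyGetD s (m : Int) []] := by
        rw [slice_snoc s (m : Int) m (by positivity) le_rfl hmlt]
        rw [PySem.List.slice_toNat s (by positivity) (by positivity)]
        simp
      rw [hsing]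
      rfl

-- ===== VERDICT (by name: the statement is the Claim_ definition above) =====
theorem group_into_tracklets_spec : Claim_equal_group_into_tracklets := by
  intro track_data gap _ _
  unfold Spec_group_into_tracklets
  unfold group_into_tracklets group_into_tracklets_alt
  by_cases h : track_data = []
  · simp [h]
  · rw [if_neg h, if_neg h]
    dsimp only
    set s := PySem.List.sorted track_data (fun x => PySem.List.pyGetD x 0 0) false with hsdef
    have hlen : 1 ≤ s.length := by
      have hp := PySem.List.sorted_perm track_data (fun x => PySem.List.pyGetD x 0 0) false
      have hl : s.length = track_data.length := hp.length_eq
      cases track_data with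
      | nil => exact absurd rfl h
      | cons a t => simp [hl]
    have hinv := trkInv s gap s.length hlen le_rfl
    rw [hinv]
    have hbksdef : trkBks s gap s.length
        = (PySem.List.pyRange 1 (s.length : Int) 1).filter
            (fun i => PySem.List.pyGetD (PySem.List.pyGetD s i []) 0 0
                  - PySem.List.pyGetD (PySem.List.pyGetD s (i - 1) []) 0 0 > gap) := by
      unfold trkBks trkItem
      rfl
    rw [← hbksdef]
    rw [show ((0 : Int) :: trkBks s gap s.length ++ [(s.length : Int)])
          = ((0 : Int) :: trkBks s gap s.length) ++ [(s.length : Int)] from rfl]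
    rw [zip_tail_snoc ((0 : Int) :: trkBks s gap s.length) (List.cons_ne_nil 0 _) (s.length : Int)]
    rw [List.map_append]
    rfl
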